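-- pv_equiv track=rewrite | github.com/SBiswal02/edgeFleetBallTracking | code/utilities.py | remove_streak_noise
-- ===== SOURCE A (Python) =====
-- def remove_streak_noise(detections, min_streak=2):
--     """
--     Remove short noise streaks before consistent ball detection.
--
--     Args:
--         detections (list): List of detections (can be None for gaps)
--         min_streak (int): Minimum consecutive detections for valid streak
--
--     Returns:
--         list: Cleaned detections
--     """
--     cleaned = detections.copy()
--     streak_count = 0
--     start_index = -1
--
--     for i, det in enumerate(cleaned):
--         if det is not None:
--             if streak_count == 0:
--                 start_index = i
--             streak_count += 1
--             if streak_count >= min_streak: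
--                 break
--         else:
--             streak_count = 0
--
--     if streak_count >= min_streak:
--         for k in range(start_index):
--             cleaned[k] = None
--
--     return cleaned
-- ===== SOURCE B (Python) =====
-- def remove_streak_noise(detections, min_streak=2):
--     # Decompose the list into maximal runs of (is-detection, length),
--     # then walk the runs to find the first detection run long enough.
--     runs = []
--     for det in detections:
--         flag = det is not None
--         if runs and runs[-1][0] == flag:
--             runs[-1][1] += 1
--         else:
--             runs.append([flag, 1])
--     start = -1
--     offset = 0
--     for flag, length in runs:
--         if flag and length >= min_streak:
--             start = offset
--             break
--         offset += length
--     cleaned = list(detections)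
--     if start > 0:
--         cleaned[:start] = [None] * start
--     return cleaned
-- ===== Notes on version B (the rewrite author's own statement) =====
-- stated objective: alternative
-- what changed: B first decomposes the list into maximal (is-detection, length) runs, then walks the runs with an offset to find the first long-enough detection run and nulls the prefix with one slice assignment, instead of A's incremental streak-counter scan with break and an index loop.
import Mathlib
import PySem

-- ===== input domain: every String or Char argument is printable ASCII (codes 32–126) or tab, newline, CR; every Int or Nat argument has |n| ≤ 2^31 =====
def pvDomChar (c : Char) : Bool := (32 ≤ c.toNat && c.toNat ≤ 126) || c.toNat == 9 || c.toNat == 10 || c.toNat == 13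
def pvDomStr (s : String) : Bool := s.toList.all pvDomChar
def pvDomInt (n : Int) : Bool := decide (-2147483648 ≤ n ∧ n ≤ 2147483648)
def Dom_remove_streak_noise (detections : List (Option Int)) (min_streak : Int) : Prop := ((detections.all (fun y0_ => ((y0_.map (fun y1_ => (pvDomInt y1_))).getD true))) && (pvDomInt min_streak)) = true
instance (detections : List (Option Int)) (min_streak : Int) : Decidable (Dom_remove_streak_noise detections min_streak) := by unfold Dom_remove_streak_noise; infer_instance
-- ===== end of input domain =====

-- B decomposes the list into maximal (is-detection, length) runs and walks them,
-- instead of A's incremental streak-counter scan; same result, proved equal (alternative decomposition).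

-- ===== PORT A =====
-- the enumerate loop of A: state (streak_count, start_index), returns state at break or at list end
def rsnLoopA (m : Int) : List (Option Int) → Int → Int → Int → Int × Int
  | [], _, streak, start => (streak, start)
  | (some _) :: rest, i, streak, start =>
      let start' := if streak = 0 then i else start
      let streak' := streak + 1
      if m ≤ streak' then (streak', start') else rsnLoopA m rest (i+1) streak' start'
  | none :: rest, i, _, start => rsnLoopA m rest (i+1) 0 start

def remove_streak_noise (detections : List (Option Int)) (min_streak : Int) : List (Option Int) :=
  let cleaned := detections
  let p := rsnLoopA min_streak cleaned 0 0 (-1)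
  if min_streak ≤ p.1 then
    (PySem.List.pyRange 0 p.2 1).foldl (fun c k => c.set k.toNat none) cleaned
  else cleaned

-- ===== PORT B =====
-- append the flag of one element to the run list (Python: extend runs[-1] or append a new run)
def rsnAddDet : List (Bool × Int) → Bool → List (Bool × Int)
  | [], f => [(f, 1)]
  | [(g, c)], f => if g = f then [(g, c+1)] else [(g, c), (f, 1)]
  | r :: s :: rest, f => r :: rsnAddDet (s :: rest) f

-- walk the runs with a running offset, looking for the first qualifying detection run
def rsnScanB (m : Int) : List (Bool × Int) → Int → Int
  | [], _ => -1
  | (flag, len) :: rest, off => if flag ∧ m ≤ len then off else rsnScanB m rest (off + len)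

def remove_streak_noise_alt (detections : List (Option Int)) (min_streak : Int) : List (Option Int) :=
  let runs := detections.foldl (fun rs det => rsnAddDet rs det.isSome) []
  let start := rsnScanB min_streak runs 0
  if 0 < start then List.replicate start.toNat none ++ detections.drop start.toNat
  else detections

-- ===== PRECONDITION & SPEC =====
def Spec_remove_streak_noise (detections : List (Option Int)) (min_streak : Int) (out : List (Option Int)) : Prop := out = remove_streak_noise_alt detections min_streak
instance (detections : List (Option Int)) (min_streak : Int) (out : List (Option Int)) : Decidable (Spec_remove_streak_noise detections min_streak out) := by unfold Spec_remove_streak_noise; infer_instance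

-- ===== CLAIM (what is proved, stated in full; the proofs are below) =====
def Claim_equal_remove_streak_noise : Prop := ∀ (detections : List (Option Int)) (min_streak : Int), Dom_remove_streak_noise detections min_streak → Spec_remove_streak_noise detections min_streak (remove_streak_noise detections min_streak)

-- ===== LEMMAS AND PROOFS =====

-- `R f c l`: B's run-building fold started from a single open run (f, c)
def rsnR (f : Bool) (c : Int) (l : List (Option Int)) : List (Bool × Int) :=
  l.foldl (fun rs det => rsnAddDet rs det.isSome) [(f, c)]

def rsnRuns (l : List (Option Int)) : List (Bool × Int) :=
  l.foldl (fun rs det => rsnAddDet rs det.isSome) []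

-- A's effective null start: the value sa when the post-loop condition fires, else -1
def rsnEff (m : Int) (p : Int × Int) : Int := if m ≤ p.1 then p.2 else -1

theorem rsnAddDet_ne_nil (b : List (Bool × Int)) (f : Bool) : rsnAddDet b f ≠ [] := by
  match b with
  | [] => simp [rsnAddDet]
  | [(g, c)] => simp [rsnAddDet]; split <;> simp
  | r :: s :: rest => simp [rsnAddDet]

theorem rsnAddDet_append (a b : List (Bool × Int)) (f : Bool) (hb : b ≠ []) :
    rsnAddDet (a ++ b) f = a ++ rsnAddDet b f := by
  induction a with
  | nil => simp
  | cons x a' ih =>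
    have h : a' ++ b ≠ [] := by simp [hb]
    have key : rsnAddDet (x :: (a' ++ b)) f = x :: rsnAddDet (a' ++ b) f := by
      match hE : a' ++ b with
      | [] => exact absurd hE h
      | y :: ys => rfl
    simpa [ih] using key

theorem rsnFoldl_append (l : List (Option Int)) (a b : List (Bool × Int)) (hb : b ≠ []) :
    l.foldl (fun rs det => rsnAddDet rs det.isSome) (a ++ b)
      = a ++ l.foldl (fun rs det => rsnAddDet rs det.isSome) b := by
  induction l generalizing b with
  | nil => simp
  | cons x t ih =>
    simp only [List.foldl_cons]
    rw [rsnAddDet_append a b _ hb, ih _ (rsnAddDet_ne_nil b _)]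

theorem rsnR_cons (f : Bool) (c : Int) (x : Option Int) (t : List (Option Int)) :
    rsnR f c (x :: t) = if x.isSome = f then rsnR f (c+1) t
      else (f, c) :: rsnR x.isSome 1 t := by
  unfold rsnR
  simp only [List.foldl_cons]
  by_cases h : x.isSome = f
  · simp [rsnAddDet, h]
  · simp only [rsnAddDet, if_neg (by simpa [eq_comm] using h), if_neg h]
    have := rsnFoldl_append t [(f, c)] [(x.isSome, 1)] (by simp)
    simpa using this

theorem rsnRuns_cons (x : Option Int) (t : List (Option Int)) :
    rsnRuns (x :: t) = rsnR x.isSome 1 t := rfl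

-- skipping a gap run: the offset just advances
theorem rsnScan_false (m : Int) (t : List (Option Int)) :
    ∀ (c off : Int), rsnScanB m (rsnR false c t) off = rsnScanB m (rsnRuns t) (off + c) := by
  induction t with
  | nil => intro c off; simp [rsnR, rsnRuns, rsnScanB]
  | cons x t ih =>
    intro c off
    by_cases h : x.isSome
    · rw [rsnR_cons, if_neg (by simp [h]), rsnScanB, if_neg (by simp), rsnRuns_cons, h]
    · rw [rsnR_cons, if_pos (by simp [h]), ih, rsnRuns_cons, eq_false_of_ne_true h, ih]
      ring_nf

-- a detection run already long enough qualifies immediately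
theorem rsnScan_true_qual (m : Int) (t : List (Option Int)) :
    ∀ (c off : Int), m ≤ c → rsnScanB m (rsnR true c t) off = off := by
  induction t with
  | nil => intro c off h; simp [rsnR, rsnScanB, h]
  | cons x t ih =>
    intro c off h
    by_cases hx : x.isSome
    · rw [rsnR_cons, if_pos (by simp [hx]), ih _ _ (by omega)]
    · rw [rsnR_cons, if_neg (by simp [hx]), rsnScanB, if_pos ⟨rfl, h⟩]

-- the central lemma: A's loop (fresh / mid-run states) matched with B's run scan
theorem rsnMain (m : Int) (l : List (Option Int)) :
    (∀ (i s : Int), (m ≤ 0 → s = -1) →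
        rsnEff m (rsnLoopA m l i 0 s) = rsnScanB m (rsnRuns l) i)
    ∧ (∀ (i c s : Int), 1 ≤ c → ¬ m ≤ c → s = i - c →
        rsnEff m (rsnLoopA m l i c s) = rsnScanB m (rsnR true c l) s) := by
  induction l with
  | nil =>
    constructor
    · intro i s hs
      simp only [rsnLoopA, rsnRuns, List.foldl_nil, rsnScanB, rsnEff]
      split
      · exact hs (by omega)
      · rfl
    · intro i c s hc hlt hs
      simp [rsnLoopA, rsnR, rsnScanB, rsnEff, hlt]
  | cons x t ih =>
    obtain ⟨ihF, ihM⟩ := ih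
    constructor
    · intro i s hs
      match x with
      | none =>
        rw [show rsnLoopA m (none :: t) i 0 s = rsnLoopA m t (i+1) 0 s from rfl,
            ihF (i+1) s hs, rsnRuns_cons]
        simp only [Option.isSome_none]
        rw [rsnScan_false]
      | some v =>
        rw [rsnRuns_cons]
        simp only [Option.isSome_some]
        by_cases hm : m ≤ 1
        · have : rsnLoopA m (some v :: t) i 0 s = (1, i) := by
            simp [rsnLoopA, hm]
          rw [this, rsnScan_true_qual m t 1 i hm]
          simp [rsnEff, hm]
        · have : rsnLoopA m (some v :: t) i 0 s = rsnLoopA m t (i+1) 1 i := by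
            simp [rsnLoopA, hm]
          rw [this, ihM (i+1) 1 i (by omega) hm (by omega)]
    · intro i c s hc hlt hs
      match x with
      | none =>
        have hrec : rsnLoopA m (none :: t) i c s = rsnLoopA m t (i+1) 0 s := rfl
        rw [hrec, ihF (i+1) s (by omega), rsnR_cons]
        simp only [Option.isSome_none]
        rw [if_neg (by simp), rsnScanB, if_neg (by simp [hlt]), rsnScan_false]
        congr 1
        omega
      | some v =>
        have hc0 : ¬ c = 0 := by omega
        rw [rsnR_cons, if_pos (by simp)]
        by_cases hm : m ≤ c + 1
        · have hstep : rsnLoopA m (some v :: t) i c s = (c + 1, s) := by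
            simp [rsnLoopA, hm, hc0]
          rw [hstep, rsnScan_true_qual m t (c+1) s hm]
          simp [rsnEff, hm]
        · have hstep : rsnLoopA m (some v :: t) i c s = rsnLoopA m t (i+1) (c+1) s := by
            simp [rsnLoopA, hm, hc0]
          rw [hstep, ihM (i+1) (c+1) s (by omega) hm (by omega)]

-- A never records a start index past the end of the list
theorem rsnLoopA_start_bound (m : Int) (l : List (Option Int)) :
    ∀ (i c s : Int), (rsnLoopA m l i c s).2 ≤ max s (i + l.length - 1) := by
  induction l with
  | nil => intro i c s; simp [rsnLoopA]
  | cons x t ih =>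
    intro i c s
    match x with
    | none =>
      have := ih (i+1) 0 s
      simp only [rsnLoopA, List.length_cons] at *
      push_cast at *
      omega
    | some v =>
      simp only [rsnLoopA, List.length_cons]
      by_cases hc : c = 0
      · rw [if_pos hc]
        split
        · simp only; push_cast; omega
        · have := ih (i+1) (c+1) i
          push_cast at *; omega
      · rw [if_neg hc]
        split
        · simp only; push_cast; omega
        · have := ih (i+1) (c+1) s
          push_cast at *; omega

-- nulling indices 0..n-1 one by one equals a replicate-prefix
theorem rsnSetFold (n : Nat) (l : List (Option Int)) (hn : n ≤ l.length) :
    (PySem.List.pyRange 0 (n : Int) 1).foldl (fun c k => c.set k.toNat none) l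
      = List.replicate n none ++ l.drop n := by
  induction n with
  | zero => simp [PySem.List.pyRange_one_eq_nil]
  | succ k ih =>
    have hk : k ≤ l.length := by omega
    have hklt : k < l.length := by omega
    rw [show ((k + 1 : Nat) : Int) = (k : Int) + 1 by push_cast; ring,
        PySem.List.pyRange_one_succ_right (by positivity),
        List.foldl_append, ih hk]
    simp only [List.foldl_cons, List.foldl_nil, Int.toNat_natCast]
    rw [List.set_append_right _ _ (by simp), List.length_replicate, Nat.sub_self,
        List.drop_eq_getElem_cons hklt, List.set_cons_zero, List.replicate_succ']
    simp

-- Int-level version of rsnSetFold, matching the ports' expressions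
theorem rsnSetFoldInt (s : Int) (l : List (Option Int)) (h0 : 0 ≤ s) (hl : s ≤ (l.length : Int)) :
    (PySem.List.pyRange 0 s 1).foldl (fun c k => c.set k.toNat none) l
      = List.replicate s.toNat none ++ l.drop s.toNat := by
  obtain ⟨n, rfl⟩ : ∃ n : Nat, s = (n : Int) := ⟨s.toNat, (Int.toNat_of_nonneg h0).symm⟩
  rw [rsnSetFold n l (by exact_mod_cast hl)]
  simp

-- ===== VERDICT (by name: the statement is the Claim_ definition above) =====
theorem remove_streak_noise_spec : Claim_equal_remove_streak_noise := by
  unfold Claim_equal_remove_streak_noise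
  intro detections m _dom
  unfold Spec_remove_streak_noise remove_streak_noise remove_streak_noise_alt
  simp only
  have hF := (rsnMain m detections).1 0 (-1) (fun _ => rfl)
  have hbnd := rsnLoopA_start_bound m detections 0 0 (-1)
  rw [show detections.foldl (fun rs det => rsnAddDet rs det.isSome) [] = rsnRuns detections from rfl]
  by_cases hm : m ≤ (rsnLoopA m detections 0 0 (-1)).1
  · have hs : rsnScanB m (rsnRuns detections) 0 = (rsnLoopA m detections 0 0 (-1)).2 := by
      rw [← hF]; simp [rsnEff, hm]
    rw [if_pos hm, hs]
    by_cases hpos : 0 < (rsnLoopA m detections 0 0 (-1)).2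
    · have hle : (rsnLoopA m detections 0 0 (-1)).2 ≤ (detections.length : Int) := by omega
      rw [if_pos hpos, rsnSetFoldInt _ _ (by omega) hle]
    · rw [if_neg hpos, PySem.List.pyRange_one_eq_nil (by omega)]
      rfl
  · have hs : rsnScanB m (rsnRuns detections) 0 = -1 := by
      rw [← hF]; simp [rsnEff, hm]
    rw [if_neg hm, hs]
    norm_num
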